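-- pv_equiv track=rewrite | github.com/vfaroni/Colosseum | modules/data_intelligence/TDHCA_RAG/comprehensive_master_integrator_with_costs.py | determine_regional_market
-- ===== SOURCE A (Python) =====
-- def determine_regional_market(city, county=None):
--     """Determine regional market based on city/county"""
--     city_str = str(city).lower()
--     county_str = str(county).lower() if county else ""
--
--     # Dallas Metro
--     if any(term in city_str for term in ['dallas', 'plano', 'frisco', 'richardson', 'garland', 'irving', 'carrollton', 'mesquite']):
--         return 'Dallas_Metro'
--     if any(term in city_str for term in ['fort worth', 'arlington', 'grand prairie', 'denton', 'lewisville']):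
--         return 'Dallas_Metro'
--
--     # Austin Metro
--     if any(term in city_str for term in ['austin', 'round rock', 'cedar park', 'pflugerville', 'georgetown']):
--         return 'Austin_Metro'
--
--     # Houston Metro
--     if any(term in city_str for term in ['houston', 'katy', 'pearland', 'sugar land', 'the woodlands', 'conroe', 'pasadena']):
--         return 'Houston_Metro'
--
--     # San Antonio Metro
--     if any(term in city_str for term in ['san antonio', 'new braunfels', 'schertz', 'universal city']):
--         return 'San_Antonio_Metro'
--
--     # West Texas
--     if any(term in city_str for term in ['midland', 'odessa', 'lubbock', 'amarillo', 'abilene']):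
--         return 'West_Texas'
--
--     # South Texas
--     if any(term in city_str for term in ['brownsville', 'mcallen', 'laredo', 'harlingen', 'edinburg']):
--         return 'South_Texas'
--
--     # East Texas Rural
--     if any(term in city_str for term in ['tyler', 'longview', 'marshall', 'beaumont', 'orange', 'port arthur']):
--         return 'East_Texas_Rural'
--
--     # Default to Rural Baseline
--     return 'Rural_Baseline'
-- ===== SOURCE B (Python) =====
-- # B: scan the (lowercased) city string once, looking each window up in a
-- # term -> rule-priority dictionary; the smallest matched priority wins,
-- # with 7 as the default 'Rural_Baseline' rule.
-- TERMS = {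
--     'dallas': 0, 'plano': 0, 'frisco': 0, 'richardson': 0, 'garland': 0,
--     'irving': 0, 'carrollton': 0, 'mesquite': 0, 'fort worth': 0,
--     'arlington': 0, 'grand prairie': 0, 'denton': 0, 'lewisville': 0,
--     'austin': 1, 'round rock': 1, 'cedar park': 1, 'pflugerville': 1, 'georgetown': 1,
--     'houston': 2, 'katy': 2, 'pearland': 2, 'sugar land': 2, 'the woodlands': 2,
--     'conroe': 2, 'pasadena': 2,
--     'san antonio': 3, 'new braunfels': 3, 'schertz': 3, 'universal city': 3,
--     'midland': 4, 'odessa': 4, 'lubbock': 4, 'amarillo': 4, 'abilene': 4,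
--     'brownsville': 5, 'mcallen': 5, 'laredo': 5, 'harlingen': 5, 'edinburg': 5,
--     'tyler': 6, 'longview': 6, 'marshall': 6, 'beaumont': 6, 'orange': 6, 'port arthur': 6,
-- }
--
-- LABELS = ['Dallas_Metro', 'Austin_Metro', 'Houston_Metro', 'San_Antonio_Metro',
--           'West_Texas', 'South_Texas', 'East_Texas_Rural', 'Rural_Baseline']
--
--
-- def determine_regional_market(city, county=None):
--     """Determine regional market based on city/county"""
--     city_str = str(city).lower()
--     county_str = str(county).lower() if county else ""
--     best = 7
--     for i in range(len(city_str)):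
--         for L in range(4, 15):  # term lengths span 4..14
--             best = min(best, TERMS.get(city_str[i:i+L], 7))
--     return LABELS[best]
-- ===== Notes on version B (the rewrite author's own statement) =====
-- stated objective: alternative
-- what changed: Instead of testing each keyword against the city string group by group, B scans the city string's positions once, looks every length-4..14 window up in a term->priority dictionary, and keeps the minimum matched priority (7 = default), so precedence is decided by a min over one haystack pass rather than an ordered chain of substring searches.
import Mathlib
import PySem

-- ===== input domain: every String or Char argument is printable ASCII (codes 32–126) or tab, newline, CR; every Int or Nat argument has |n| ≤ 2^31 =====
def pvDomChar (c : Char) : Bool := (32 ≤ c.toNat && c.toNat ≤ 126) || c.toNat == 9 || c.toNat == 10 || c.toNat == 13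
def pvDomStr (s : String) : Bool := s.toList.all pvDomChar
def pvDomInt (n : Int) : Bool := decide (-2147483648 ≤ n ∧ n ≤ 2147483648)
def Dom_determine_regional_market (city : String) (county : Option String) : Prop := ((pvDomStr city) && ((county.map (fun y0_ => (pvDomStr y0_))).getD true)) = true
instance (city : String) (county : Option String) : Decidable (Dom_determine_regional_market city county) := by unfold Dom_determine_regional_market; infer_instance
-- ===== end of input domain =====

-- B replaces A's ordered group-by-group substring tests by one scan of the city
-- string with a term→priority dictionary, keeping the minimum matched priority.

-- ===== PORT A =====
-- Port of A: the county_str line is computed (and unused) exactly as in the Python.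
def determine_regional_market (city : String) (county : Option String) : String :=
  let city_str := PySem.Str.lower city
  let _county_str := match county with
    | some s => if s ≠ "" then PySem.Str.lower s else ""
    | none => ""
  if (["dallas", "plano", "frisco", "richardson", "garland", "irving", "carrollton", "mesquite"].any
      (fun term => PySem.Str.isIn term city_str)) then "Dallas_Metro"
  else if (["fort worth", "arlington", "grand prairie", "denton", "lewisville"].any
      (fun term => PySem.Str.isIn term city_str)) then "Dallas_Metro"
  else if (["austin", "round rock", "cedar park", "pflugerville", "georgetown"].any
      (fun term => PySem.Str.isIn term city_str)) then "Austin_Metro"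
  else if (["houston", "katy", "pearland", "sugar land", "the woodlands", "conroe", "pasadena"].any
      (fun term => PySem.Str.isIn term city_str)) then "Houston_Metro"
  else if (["san antonio", "new braunfels", "schertz", "universal city"].any
      (fun term => PySem.Str.isIn term city_str)) then "San_Antonio_Metro"
  else if (["midland", "odessa", "lubbock", "amarillo", "abilene"].any
      (fun term => PySem.Str.isIn term city_str)) then "West_Texas"
  else if (["brownsville", "mcallen", "laredo", "harlingen", "edinburg"].any
      (fun term => PySem.Str.isIn term city_str)) then "South_Texas"
  else if (["tyler", "longview", "marshall", "beaumont", "orange", "port arthur"].any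
      (fun term => PySem.Str.isIn term city_str)) then "East_Texas_Rural"
  else "Rural_Baseline"

-- ===== PORT B =====
-- the TERMS dict of Source B: term → rule priority (0..6; 7 is the default rule)
def drmTerms : PySem.Dict String Nat := PySem.Dict.mk
  [("dallas", 0), ("plano", 0), ("frisco", 0), ("richardson", 0), ("garland", 0),
   ("irving", 0), ("carrollton", 0), ("mesquite", 0), ("fort worth", 0),
   ("arlington", 0), ("grand prairie", 0), ("denton", 0), ("lewisville", 0),
   ("austin", 1), ("round rock", 1), ("cedar park", 1), ("pflugerville", 1), ("georgetown", 1),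
   ("houston", 2), ("katy", 2), ("pearland", 2), ("sugar land", 2), ("the woodlands", 2),
   ("conroe", 2), ("pasadena", 2),
   ("san antonio", 3), ("new braunfels", 3), ("schertz", 3), ("universal city", 3),
   ("midland", 4), ("odessa", 4), ("lubbock", 4), ("amarillo", 4), ("abilene", 4),
   ("brownsville", 5), ("mcallen", 5), ("laredo", 5), ("harlingen", 5), ("edinburg", 5),
   ("tyler", 6), ("longview", 6), ("marshall", 6), ("beaumont", 6), ("orange", 6), ("port arthur", 6)]

def drmLabels : List String :=
  ["Dallas_Metro", "Austin_Metro", "Houston_Metro", "San_Antonio_Metro",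
   "West_Texas", "South_Texas", "East_Texas_Rural", "Rural_Baseline"]

def determine_regional_market_alt (city : String) (county : Option String) : String :=
  let city_str := PySem.Str.lower city
  let _county_str := match county with
    | some s => if s ≠ "" then PySem.Str.lower s else ""
    | none => ""
  let best := (PySem.List.pyRange 0 (PySem.Str.len city_str) 1).foldl
    (fun b i => (PySem.List.pyRange 4 15 1).foldl
      (fun b L => min b (PySem.Dict.getD drmTerms (PySem.Str.slice city_str (some i) (some (i + L))) 7)) b) 7
  -- LABELS[best]: best ≤ 7 always, so the lookup is total
  (PySem.List.pyGet? drmLabels (best : Int)).getD ""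

-- ===== PRECONDITION & SPEC =====
def Spec_determine_regional_market (city : String) (county : Option String) (out : String) : Prop := out = determine_regional_market_alt city county
instance (city : String) (county : Option String) (out : String) : Decidable (Spec_determine_regional_market city county out) := by unfold Spec_determine_regional_market; infer_instance

-- ===== CLAIM (what is proved, stated in full; the proofs are below) =====
def Claim_equal_determine_regional_market : Prop := ∀ (city : String) (county : Option String), Dom_determine_regional_market city county → Spec_determine_regional_market city county (determine_regional_market city county)

-- ===== LEMMAS AND PROOFS =====

-- A's keyword groups, indexed by priority (the two Dallas groups appended)
def drmRule : Nat → List String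
  | 0 => ["dallas", "plano", "frisco", "richardson", "garland", "irving", "carrollton", "mesquite"]
        ++ ["fort worth", "arlington", "grand prairie", "denton", "lewisville"]
  | 1 => ["austin", "round rock", "cedar park", "pflugerville", "georgetown"]
  | 2 => ["houston", "katy", "pearland", "sugar land", "the woodlands", "conroe", "pasadena"]
  | 3 => ["san antonio", "new braunfels", "schertz", "universal city"]
  | 4 => ["midland", "odessa", "lubbock", "amarillo", "abilene"]
  | 5 => ["brownsville", "mcallen", "laredo", "harlingen", "edinburg"]
  | 6 => ["tyler", "longview", "marshall", "beaumont", "orange", "port arthur"]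
  | _ => []

def drmCond (u : String) (p : Nat) : Bool := (drmRule p).any (fun t => PySem.Str.isIn t u)

def drmChain (u : String) : String :=
  if drmCond u 0 then "Dallas_Metro"
  else if drmCond u 1 then "Austin_Metro"
  else if drmCond u 2 then "Houston_Metro"
  else if drmCond u 3 then "San_Antonio_Metro"
  else if drmCond u 4 then "West_Texas"
  else if drmCond u 5 then "South_Texas"
  else if drmCond u 6 then "East_Texas_Rural"
  else "Rural_Baseline"

def drmG (u : String) (i L : Int) : Nat :=
  PySem.Dict.getD drmTerms (PySem.Str.slice u (some i) (some (i + L))) 7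

def drmVals (u : String) : List Nat :=
  (PySem.List.pyRange 0 (PySem.Str.len u) 1).flatMap
    (fun i => (PySem.List.pyRange 4 15 1).map (drmG u i))

-- A is the chain over drmCond
theorem drm_A_eq_chain (city : String) (county : Option String) :
    determine_regional_market city county = drmChain (PySem.Str.lower city) := by
  unfold determine_regional_market drmChain drmCond drmRule
  simp only [List.any_append]
  cases h : (["dallas", "plano", "frisco", "richardson", "garland", "irving", "carrollton",
      "mesquite"].any (fun t => PySem.Str.isIn t (PySem.Str.lower city))) <;>
    cases h2 : (["fort worth", "arlington", "grand prairie", "denton", "lewisville"].any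
      (fun t => PySem.Str.isIn t (PySem.Str.lower city))) <;> simp

-- nested min-fold flattens to one fold over all produced values
theorem drm_foldl_foldl_min {α : Type} (f : α → List Nat) :
    ∀ (l : List α) (b : Nat),
      l.foldl (fun b x => (f x).foldl min b) b = (l.flatMap f).foldl min b := by
  intro l
  induction l with
  | nil => intro b; rfl
  | cons x xs ih => intro b; simp only [List.foldl_cons, List.flatMap_cons, List.foldl_append, ih]

theorem drm_foldl_min_le_init (l : List Nat) (b : Nat) : l.foldl min b ≤ b := by
  induction l generalizing b with
  | nil => simp
  | cons x xs ih => exact le_trans (ih _) (min_le_left _ _)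

theorem drm_foldl_min_le_mem (l : List Nat) (x : Nat) (hx : x ∈ l) :
    ∀ b, l.foldl min b ≤ x := by
  induction l with
  | nil => cases hx
  | cons y ys ih =>
    intro b
    rcases List.mem_cons.mp hx with rfl | h
    · exact le_trans (drm_foldl_min_le_init ys (min b x)) (min_le_right _ _)
    · exact ih h _

theorem drm_foldl_min_cases (l : List Nat) (b : Nat) : l.foldl min b = b ∨ l.foldl min b ∈ l := by
  induction l generalizing b with
  | nil => left; rfl
  | cons y ys ih =>
    rcases ih (min b y) with h | h
    · rw [List.foldl_cons, h]
      rcases min_choice b y with h' | h'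
      · left; exact h'
      · right; rw [h']; exact List.mem_cons_self
    · right; exact List.mem_cons_of_mem _ h

-- every entry of TERMS lies in its rule's list, with priority < 7, and looks up to its priority
theorem drm_items_sound : ∀ e ∈ drmTerms.items,
    e.1 ∈ drmRule e.2 ∧ e.2 < 7 ∧ PySem.Dict.getD drmTerms e.1 7 = e.2 := by decide

-- every rule term has length 4..14, is nonempty, and looks up to its rule's priority
theorem drm_rules_sound : ∀ p : Fin 7, ∀ t ∈ drmRule p.val,
    4 ≤ t.length ∧ t.length < 15 ∧ PySem.Dict.getD drmTerms t 7 = p.val ∧ t.toList ≠ [] := by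
  decide

-- a value in drmVals is 7 (miss) or the priority of a rule whose condition holds
theorem drm_mem_vals (u : String) (x : Nat) (hx : x ∈ drmVals u) :
    x = 7 ∨ (x < 7 ∧ drmCond u x = true) := by
  simp only [drmVals, List.mem_flatMap, List.mem_map] at hx
  obtain ⟨i, hi, L, hL, hg⟩ := hx
  by_cases h7 : x = 7
  · exact Or.inl h7
  · right
    unfold drmG at hg
    rcases hget : PySem.Dict.get? drmTerms (PySem.Str.slice u (some i) (some (i + L))) with _ | v
    · rw [PySem.Dict.getD_eq_get?_getD, hget] at hg; exact absurd hg.symm h7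
    · have hmem := PySem.Dict.mem_items_of_get?_eq_some drmTerms hget
      rw [PySem.Dict.getD_eq_get?_getD, hget] at hg
      simp only [Option.getD_some] at hg
      subst hg
      obtain ⟨hr, hlt, -⟩ := drm_items_sound _ hmem
      refine ⟨hlt, ?_⟩
      -- the matched key is a substring of u, so rule x's condition fires
      have h0i : (0:Int) ≤ i := (PySem.List.mem_pyRange_one.mp hi).1
      have h4L : (4:Int) ≤ L := (PySem.List.mem_pyRange_one.mp hL).1
      have hin : PySem.Str.isIn (PySem.Str.slice u (some i) (some (i + L))) u = true := by
        rw [PySem.Str.isIn_iff_infix, PySem.Str.toList_slice,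
          PySem.Chars.slice_eq_listSlice,
          PySem.List.slice_toNat u.toList h0i (by omega : (0:Int) ≤ i + L)]
        exact ((List.take_prefix _ _).isInfix).trans ((List.drop_suffix _ _).isInfix)
      exact List.any_eq_true.mpr ⟨_, hr, hin⟩

-- conversely: a firing rule contributes its priority to drmVals
theorem drm_cond_mem (u : String) (p : Fin 7) (hc : drmCond u p.val = true) :
    p.val ∈ drmVals u := by
  obtain ⟨t, ht, hin⟩ := List.any_eq_true.mp hc
  obtain ⟨hlen4, hlen15, hget, hne⟩ := drm_rules_sound p t ht
  have hin' : t.toList <:+: u.toList := (PySem.Str.isIn_iff_infix t u).mp hin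
  obtain ⟨pre, suf, heq⟩ := hin'
  have hpre : t.toList <+: u.toList.drop pre.length := by
    rw [← heq]; simp
  have hjlt : pre.length < u.toList.length := by
    by_contra h
    rw [List.drop_eq_nil_of_le (by omega)] at hpre
    exact hne (List.prefix_nil.mp hpre)
  have htake : (u.toList.drop pre.length).take t.toList.length = t.toList :=
    (List.prefix_iff_eq_take.mp hpre).symm
  have hslice : PySem.Str.slice u (some (pre.length : Int))
      (some ((pre.length : Int) + (t.length : Int))) = t := by
    apply String.toList_inj.mp
    rw [PySem.Str.toList_slice, PySem.Chars.slice_eq_listSlice,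
      show ((t.length : Int)) = ((t.toList.length : Nat) : Int) by
        rw [String.length_toList],
      PySem.List.slice_natCast_add]
    exact htake
  simp only [drmVals, List.mem_flatMap, List.mem_map]
  refine ⟨(pre.length : Int), ?_, (t.length : Int), ?_, ?_⟩
  · rw [PySem.List.mem_pyRange_one, PySem.Str.len_eq]
    constructor
    · omega
    · exact_mod_cast hjlt
  · rw [PySem.List.mem_pyRange_one]
    have h4 : 4 ≤ t.toList.length := by rw [String.length_toList]; exact hlen4
    have h15 : t.toList.length < 15 := by rw [String.length_toList]; exact hlen15
    constructor <;> omega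
  · unfold drmG
    rw [hslice, hget]

theorem drm_nested_eq (u : String) :
    (PySem.List.pyRange 0 (PySem.Str.len u) 1).foldl
      (fun b i => (PySem.List.pyRange 4 15 1).foldl
        (fun b L => min b (PySem.Dict.getD drmTerms (PySem.Str.slice u (some i) (some (i + L))) 7)) b) 7
    = (drmVals u).foldl min 7 := by
  unfold drmVals
  rw [← drm_foldl_foldl_min]
  congr 1

-- B unfolds to labels[min over drmVals]
theorem drm_B_eq (city : String) (county : Option String) :
    determine_regional_market_alt city county =
      (PySem.List.pyGet? drmLabels
        ((((drmVals (PySem.Str.lower city)).foldl min 7 : Nat) : Int))).getD "" := by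
  unfold determine_regional_market_alt
  dsimp only
  rw [drm_nested_eq]

-- the minimum matched priority reproduces A's first-match chain
theorem drm_main (u : String) :
    (PySem.List.pyGet? drmLabels (((drmVals u).foldl min 7 : Nat) : Int)).getD "" = drmChain u := by
  have hle7 := drm_foldl_min_le_init (drmVals u) 7
  have hcases := drm_foldl_min_cases (drmVals u) 7
  set m := (drmVals u).foldl min 7 with hm
  have hmv : m = 7 ∨ (m < 7 ∧ drmCond u m = true) := by
    rcases hcases with h | h
    · exact Or.inl h
    · exact drm_mem_vals u m h
  unfold drmChain
  by_cases c0 : drmCond u 0 = true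
  · have h0 := drm_foldl_min_le_mem _ _ (show (0:Nat) ∈ drmVals u from drm_cond_mem u ⟨0, by omega⟩ c0) 7
    rw [← hm] at h0
    rw [if_pos c0, show m = 0 by omega]
    rfl
  · rw [if_neg c0]
    by_cases c1 : drmCond u 1 = true
    · have hk := drm_foldl_min_le_mem _ _ (show (1:Nat) ∈ drmVals u from drm_cond_mem u ⟨1, by omega⟩ c1) 7
      rw [← hm] at hk
      have : m = 1 := by
        rcases hmv with h | ⟨hlt, hcond⟩
        · omega
        · interval_cases m <;> simp_all
      rw [if_pos c1, this]; rfl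
    · rw [if_neg c1]
      by_cases c2 : drmCond u 2 = true
      · have hk := drm_foldl_min_le_mem _ _ (show (2:Nat) ∈ drmVals u from drm_cond_mem u ⟨2, by omega⟩ c2) 7
        rw [← hm] at hk
        have : m = 2 := by
          rcases hmv with h | ⟨hlt, hcond⟩
          · omega
          · interval_cases m <;> simp_all
        rw [if_pos c2, this]; rfl
      · rw [if_neg c2]
        by_cases c3 : drmCond u 3 = true
        · have hk := drm_foldl_min_le_mem _ _ (show (3:Nat) ∈ drmVals u from drm_cond_mem u ⟨3, by omega⟩ c3) 7
          rw [← hm] at hk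
          have : m = 3 := by
            rcases hmv with h | ⟨hlt, hcond⟩
            · omega
            · interval_cases m <;> simp_all
          rw [if_pos c3, this]; rfl
        · rw [if_neg c3]
          by_cases c4 : drmCond u 4 = true
          · have hk := drm_foldl_min_le_mem _ _ (show (4:Nat) ∈ drmVals u from drm_cond_mem u ⟨4, by omega⟩ c4) 7
            rw [← hm] at hk
            have : m = 4 := by
              rcases hmv with h | ⟨hlt, hcond⟩
              · omega
              · interval_cases m <;> simp_all
            rw [if_pos c4, this]; rfl
          · rw [if_neg c4]
            by_cases c5 : drmCond u 5 = true
            · have hk := drm_foldl_min_le_mem _ _ (show (5:Nat) ∈ drmVals u from drm_cond_mem u ⟨5, by omega⟩ c5) 7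
              rw [← hm] at hk
              have : m = 5 := by
                rcases hmv with h | ⟨hlt, hcond⟩
                · omega
                · interval_cases m <;> simp_all
              rw [if_pos c5, this]; rfl
            · rw [if_neg c5]
              by_cases c6 : drmCond u 6 = true
              · have hk := drm_foldl_min_le_mem _ _ (show (6:Nat) ∈ drmVals u from drm_cond_mem u ⟨6, by omega⟩ c6) 7
                rw [← hm] at hk
                have : m = 6 := by
                  rcases hmv with h | ⟨hlt, hcond⟩
                  · omega
                  · interval_cases m <;> simp_all
                rw [if_pos c6, this]; rfl
              · rw [if_neg c6]
                have : m = 7 := by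
                  rcases hmv with h | ⟨hlt, hcond⟩
                  · exact h
                  · interval_cases m <;> simp_all
                rw [this]; rfl

-- ===== VERDICT (by name: the statement is the Claim_ definition above) =====
theorem determine_regional_market_spec : Claim_equal_determine_regional_market := by
  intro city county _
  unfold Spec_determine_regional_market
  rw [drm_A_eq_chain, drm_B_eq, drm_main]
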